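-- pv_equiv track=rewrite | github.com/apapadoi/tsad-for-pdm | src/pdm-evaluation/utils/loadDataset.py | generate_early_detection_labels_SETUP_1_constant
-- ===== SOURCE A (Python) =====
-- def generate_early_detection_labels_SETUP_1_constant(original_labels,PH_span, PH_span_early):
--     """
--     Setup 1 place the  middle of the predictive horizon in the start of the anomaly range and spans +- PH_span length
--     :param original_labels:
--     :param PH:
--     :return:
--     """
--     early_detection_labels=[0 for i in range(len(original_labels))]
--     for i in range(1, len(original_labels)):
--         if original_labels[i] == 1 and original_labels[i - 1] == 0:
--             center = i
--             stop_labels = len(original_labels)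
--             for j in range(center, len(original_labels)):
--                 if original_labels[j] == 0:
--                     stop_labels = j
--                     break
--             for qi in range(max(0, center - PH_span), min(stop_labels, center + PH_span_early)):
--                 early_detection_labels[qi] = 1
--     return early_detection_labels
-- ===== SOURCE B (Python) =====
-- def generate_early_detection_labels_SETUP_1_constant(original_labels, PH_span, PH_span_early):
--     n = len(original_labels)
--     # One forward pass: detect each anomaly onset and close its run at the first
--     # following zero, collecting one half-open window (lo, hi) per onset.
--     intervals = []
--     start = None
--     for i in range(1, n):
--         if original_labels[i] == 1 and original_labels[i - 1] == 0:
--             start = i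
--         elif start is not None and original_labels[i] == 0:
--             intervals.append((max(0, start - PH_span), min(i, start + PH_span_early)))
--             start = None
--     if start is not None:
--         intervals.append((max(0, start - PH_span), min(n, start + PH_span_early)))
--     # Difference-array marking + prefix sum over all windows at once.
--     diff = [0] * (n + 1)
--     for lo, hi in intervals:
--         if lo < hi:
--             diff[lo] += 1
--             diff[hi] -= 1
--     out = []
--     acc = 0
--     for k in range(n):
--         acc += diff[k]
--         out.append(1 if acc > 0 else 0)
--     return out
-- ===== Notes on version B (the rewrite author's own statement) =====
-- stated objective: alternative
-- what changed: A writes 1s into a mutable label array window-by-window, rescanning forward from each onset to find the end of its anomaly run; B makes one forward pass that detects onsets and closes each run at the first following zero, collecting one (lo,hi) window per onset, then marks all windows at once with a difference array and a single prefix-sum pass.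
import Mathlib
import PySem

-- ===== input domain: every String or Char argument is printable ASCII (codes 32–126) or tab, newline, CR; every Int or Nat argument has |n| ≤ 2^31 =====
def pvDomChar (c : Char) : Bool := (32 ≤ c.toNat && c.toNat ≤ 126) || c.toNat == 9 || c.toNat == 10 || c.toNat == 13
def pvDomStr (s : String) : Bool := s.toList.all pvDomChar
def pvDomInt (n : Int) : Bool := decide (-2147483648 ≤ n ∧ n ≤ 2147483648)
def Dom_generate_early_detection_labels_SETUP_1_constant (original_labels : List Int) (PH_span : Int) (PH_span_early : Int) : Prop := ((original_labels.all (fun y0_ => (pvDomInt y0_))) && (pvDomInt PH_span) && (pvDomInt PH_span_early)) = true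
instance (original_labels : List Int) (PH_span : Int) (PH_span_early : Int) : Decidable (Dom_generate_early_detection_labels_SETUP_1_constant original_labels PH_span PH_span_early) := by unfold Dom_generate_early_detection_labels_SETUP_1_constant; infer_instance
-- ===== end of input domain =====

-- B replaces A's per-onset forward rescan and window-by-window marking by one onset/run-end
-- scan plus difference-array marking with a prefix-sum pass (objective: alternative).

-- ===== PORT A =====
-- every index A and B use is in range, so pyGetD with default 0 is exact here
def pvGetI (xs : List Int) (i : Int) : Int := PySem.List.pyGetD xs i 0

-- A's inner 'for j in range(center, n): if labels[j] == 0: stop_labels = j; break'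
def pvStopLoop (labels : List Int) (js : List Int) (d : Int) : Int :=
  match js with
  | [] => d
  | j :: rest => if pvGetI labels j == 0 then j else pvStopLoop labels rest d

def pvStepA (labels : List Int) (PH_span PH_span_early : Int) (acc : List Int) (i : Int) : List Int :=
  if pvGetI labels i == 1 && pvGetI labels (i - 1) == 0 then
    let stop := pvStopLoop labels (PySem.List.pyRange i (labels.length : Int) 1) (labels.length : Int)
    (PySem.List.pyRange (max 0 (i - PH_span)) (min stop (i + PH_span_early)) 1).foldl
      (fun a qi => a.set qi.toNat 1) acc
  else acc

def generate_early_detection_labels_SETUP_1_constant (original_labels : List Int) (PH_span : Int) (PH_span_early : Int) : List Int :=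
  let init : List Int := (List.range original_labels.length).map (fun _ => (0 : Int))
  (PySem.List.pyRange 1 (original_labels.length : Int) 1).foldl
    (pvStepA original_labels PH_span PH_span_early) init

-- ===== PORT B =====
-- B's scan body: onset opens a pending run, the first zero after it closes the window
def pvStepB (labels : List Int) (PH_span PH_span_early : Int)
    (st : List (Int × Int) × Option Int) (i : Int) : List (Int × Int) × Option Int :=
  if pvGetI labels i == 1 && pvGetI labels (i - 1) == 0 then (st.1, some i)
  else
    match st.2 with
    | some s =>
        if pvGetI labels i == 0 then
          (st.1 ++ [(max 0 (s - PH_span), min i (s + PH_span_early))], none)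
        else st
    | none => st

def generate_early_detection_labels_SETUP_1_constant_alt (original_labels : List Int) (PH_span : Int) (PH_span_early : Int) : List Int :=
  let n : Int := (original_labels.length : Int)
  let st := (PySem.List.pyRange 1 n 1).foldl (pvStepB original_labels PH_span PH_span_early) ([], none)
  let ivs : List (Int × Int) :=
    match st.2 with
    | some s => st.1 ++ [(max 0 (s - PH_span), min n (s + PH_span_early))]
    | none => st.1
  let diff : List Int :=
    ivs.foldl (fun d p =>
      if p.1 < p.2 then
        (d.set p.1.toNat (PySem.List.pyGetD d p.1 0 + 1)).set p.2.toNat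
          (PySem.List.pyGetD (d.set p.1.toNat (PySem.List.pyGetD d p.1 0 + 1)) p.2 0 - 1)
      else d)
      ((List.range (original_labels.length + 1)).map (fun _ => (0 : Int)))
  (((List.range original_labels.length).foldl (fun (s : Int × List Int) (k : Nat) =>
      let acc := s.1 + PySem.List.pyGetD diff (k : Int) 0
      (acc, s.2 ++ [if acc > 0 then (1 : Int) else 0])) ((0 : Int), []))).2

-- ===== PRECONDITION & SPEC =====
def Spec_generate_early_detection_labels_SETUP_1_constant (original_labels : List Int) (PH_span : Int) (PH_span_early : Int) (out : List Int) : Prop := out = generate_early_detection_labels_SETUP_1_constant_alt original_labels PH_span PH_span_early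
instance (original_labels : List Int) (PH_span : Int) (PH_span_early : Int) (out : List Int) : Decidable (Spec_generate_early_detection_labels_SETUP_1_constant original_labels PH_span PH_span_early out) := by unfold Spec_generate_early_detection_labels_SETUP_1_constant; infer_instance

-- ===== CLAIM (what is proved, stated in full; the proofs are below) =====
def Claim_equal_generate_early_detection_labels_SETUP_1_constant : Prop := ∀ (original_labels : List Int) (PH_span : Int) (PH_span_early : Int), Dom_generate_early_detection_labels_SETUP_1_constant original_labels PH_span PH_span_early → Spec_generate_early_detection_labels_SETUP_1_constant original_labels PH_span PH_span_early (generate_early_detection_labels_SETUP_1_constant original_labels PH_span PH_span_early)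

-- ===== LEMMAS AND PROOFS =====

-- the first index j ≥ i with labels[j] = 0 (L.length if none): the value of A's inner loop
def pvStop (L : List Int) (i : Int) : Int :=
  pvStopLoop L (PySem.List.pyRange i (L.length : Int) 1) (L.length : Int)

def pvOnset (L : List Int) (i : Int) : Bool := pvGetI L i == 1 && pvGetI L (i - 1) == 0

def pvLo (i PH : Int) : Int := max 0 (i - PH)
def pvHi (L : List Int) (i PHe : Int) : Int := min (pvStop L i) (i + PHe)

lemma pvStop_spec (L : List Int) : ∀ fuel : Nat, ∀ i : Int, 0 ≤ i → i ≤ (L.length : Int) →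
    ((L.length : Int) - i).toNat ≤ fuel →
    i ≤ pvStop L i ∧ pvStop L i ≤ (L.length : Int) ∧
    (pvStop L i < (L.length : Int) → pvGetI L (pvStop L i) = 0) ∧
    (∀ j, i ≤ j → j < pvStop L i → pvGetI L j ≠ 0) := by
  intro fuel
  induction fuel with
  | zero =>
    intro i h0 h1 hf
    have hi : i = (L.length : Int) := by omega
    subst hi
    unfold pvStop
    rw [PySem.List.pyRange_one_eq_nil (by omega)]
    simp only [pvStopLoop]
    refine ⟨le_refl _, le_refl _, by intro h; omega, by intro j hj1 hj2; omega⟩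
  | succ f ih =>
    intro i h0 h1 hf
    by_cases hi : i < (L.length : Int)
    · have hcons : PySem.List.pyRange i (L.length : Int) 1 = i :: PySem.List.pyRange (i+1) (L.length : Int) 1 :=
        PySem.List.pyRange_one_cons hi
      by_cases hz : pvGetI L i = 0
      · have hstop : pvStop L i = i := by
          unfold pvStop; rw [hcons]; simp [pvStopLoop, hz]
        rw [hstop]
        exact ⟨le_refl _, by omega, fun _ => hz, fun j hj1 hj2 => by omega⟩
      · have hstop : pvStop L i = pvStop L (i+1) := by
          unfold pvStop; rw [hcons]; simp [pvStopLoop, hz]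
        obtain ⟨c1, c2, c3, c4⟩ := ih (i+1) (by omega) (by omega) (by omega)
        rw [hstop]
        refine ⟨by omega, c2, c3, ?_⟩
        intro j hj1 hj2
        rcases eq_or_lt_of_le hj1 with h | h
        · rw [← h]; exact hz
        · exact c4 j (by omega) hj2
    · have hi' : i = (L.length : Int) := by omega
      subst hi'
      unfold pvStop
      rw [PySem.List.pyRange_one_eq_nil (by omega)]
      simp only [pvStopLoop]
      refine ⟨le_refl _, le_refl _, by intro h; omega, by intro j hj1 hj2; omega⟩

-- ---- A-side: marking a window sets exactly its indices to 1 ----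
lemma pvMark_length (qs : List Int) : ∀ acc : List Int,
    (qs.foldl (fun a qi => a.set qi.toNat 1) acc).length = acc.length := by
  induction qs with
  | nil => intro acc; rfl
  | cons q rest ih => intro acc; simpa using ih (acc.set q.toNat 1)

lemma pvMark_getElem? (qs : List Int) : ∀ (acc : List Int) (k : Nat),
    (qs.foldl (fun a qi => a.set qi.toNat 1) acc)[k]? =
      if qs.any (fun q => q.toNat == k) then (if k < acc.length then some 1 else none)
      else acc[k]? := by
  induction qs with
  | nil => intro acc k; simp
  | cons q rest ih =>
    intro acc k
    simp only [List.foldl_cons, List.any_cons, Bool.or_eq_true]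
    rw [ih]
    by_cases hq : q.toNat = k
    · subst hq
      by_cases hr : rest.any (fun p => p.toNat == q.toNat)
      · simp [hr, List.length_set]
      · rcases Nat.lt_or_ge q.toNat acc.length with h | h
        · simp [hr, List.getElem?_set_self', List.getElem?_eq_getElem h, h, Function.const]
        · simp [hr, List.getElem?_set_self', List.getElem?_eq_none h, Nat.not_lt.mpr h]
    · by_cases hr : rest.any (fun p => p.toNat == k)
      · simp [hr, hq, List.length_set]
      · simp [hr, hq, List.getElem?_set_ne hq]

lemma pvAfold (L : List Int) (PH PHe : Int) : ∀ (R : List Int) (acc : List Int),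
    acc.length = L.length → (∀ i ∈ R, 0 ≤ i) →
    (R.foldl (pvStepA L PH PHe) acc).length = L.length ∧
    ∀ k : Nat,
      (R.foldl (pvStepA L PH PHe) acc)[k]? =
        if (∃ i ∈ R, pvOnset L i = true ∧ pvLo i PH ≤ (k : Int) ∧ (k : Int) < pvHi L i PHe) ∧ k < L.length
        then some 1 else acc[k]? := by
  intro R
  induction R with
  | nil =>
    intro acc hlen _
    exact ⟨hlen, by intro k; simp⟩
  | cons i R' ih =>
    intro acc hlen hpos
    have hlen' : (pvStepA L PH PHe acc i).length = L.length := by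
      unfold pvStepA
      split
      · rw [pvMark_length]; exact hlen
      · exact hlen
    have hacc' : ∀ k : Nat, (pvStepA L PH PHe acc i)[k]? =
        if (pvOnset L i = true ∧ pvLo i PH ≤ (k : Int) ∧ (k : Int) < pvHi L i PHe) ∧ k < L.length
        then some 1 else acc[k]? := by
      intro k
      unfold pvStepA
      by_cases hon : (pvGetI L i == 1 && pvGetI L (i - 1) == 0) = true
      · rw [if_pos hon, pvMark_getElem?]
        have hany : ((PySem.List.pyRange (max 0 (i - PH))
            (min (pvStopLoop L (PySem.List.pyRange i (L.length : Int) 1) (L.length : Int)) (i + PHe)) 1).any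
              (fun q => q.toNat == k)) = true ↔
            (pvLo i PH ≤ (k : Int) ∧ (k : Int) < pvHi L i PHe) := by
          rw [List.any_eq_true]
          constructor
          · rintro ⟨q, hqmem, hq⟩
            rw [PySem.List.mem_pyRange_one] at hqmem
            simp only [beq_iff_eq] at hq
            unfold pvLo pvHi pvStop
            omega
          · intro h
            unfold pvLo pvHi pvStop at h
            exact ⟨(k : Int), by rw [PySem.List.mem_pyRange_one]; omega, by simp⟩
        have honset : pvOnset L i = true := hon
        by_cases hcov : pvLo i PH ≤ (k : Int) ∧ (k : Int) < pvHi L i PHe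
        · rw [hany.mpr hcov]
          by_cases hk : k < L.length
          · simp [hk, hlen, honset, hcov]
          · simp [hk, hlen, List.getElem?_eq_none (show acc.length ≤ k by omega)]
        · have hfalse : ((PySem.List.pyRange (max 0 (i - PH))
              (min (pvStopLoop L (PySem.List.pyRange i (L.length : Int) 1) (L.length : Int)) (i + PHe)) 1).any
                (fun q => q.toNat == k)) = false := by
            cases h : ((PySem.List.pyRange (max 0 (i - PH))
                (min (pvStopLoop L (PySem.List.pyRange i (L.length : Int) 1) (L.length : Int)) (i + PHe)) 1).any
                  (fun q => q.toNat == k))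
            · rfl
            · exact absurd (hany.mp h) hcov
          rw [hfalse]
          simp [hcov]
      · rw [if_neg hon]
        have honset : pvOnset L i ≠ true := fun h => hon h
        simp [honset]
    obtain ⟨ihlen, ihget⟩ := ih (pvStepA L PH PHe acc i) hlen'
      (fun j hj => hpos j (List.mem_cons_of_mem _ hj))
    refine ⟨by simpa using ihlen, ?_⟩
    intro k
    simp only [List.foldl_cons]
    rw [ihget k, hacc' k]
    by_cases hk : k < L.length
    · by_cases hex : ∃ j ∈ R', pvOnset L j = true ∧ pvLo j PH ≤ (k : Int) ∧ (k : Int) < pvHi L j PHe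
      · obtain ⟨j, hj1, hj2⟩ := hex
        have hA : ∃ j ∈ R', pvOnset L j = true ∧ pvLo j PH ≤ (k : Int) ∧ (k : Int) < pvHi L j PHe :=
          ⟨j, hj1, hj2⟩
        have hB : ∃ j ∈ i :: R', pvOnset L j = true ∧ pvLo j PH ≤ (k : Int) ∧ (k : Int) < pvHi L j PHe :=
          ⟨j, List.mem_cons_of_mem _ hj1, hj2⟩
        rw [if_pos (And.intro hA hk), if_pos (And.intro hB hk)]
      · rw [if_neg (fun h => hex h.1)]
        by_cases hci : pvOnset L i = true ∧ pvLo i PH ≤ (k : Int) ∧ (k : Int) < pvHi L i PHe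
        · have hB : ∃ j ∈ i :: R', pvOnset L j = true ∧ pvLo j PH ≤ (k : Int) ∧ (k : Int) < pvHi L j PHe :=
            ⟨i, List.mem_cons_self, hci⟩
          rw [if_pos (And.intro hci hk), if_pos (And.intro hB hk)]
        · have hnone : ¬ ∃ j ∈ i :: R', pvOnset L j = true ∧ pvLo j PH ≤ (k : Int) ∧ (k : Int) < pvHi L j PHe := by
            rintro ⟨j, hjmem, hjp⟩
            rcases List.mem_cons.mp hjmem with h | h
            · exact hci (h ▸ hjp)
            · exact hex ⟨j, h, hjp⟩
          rw [if_neg (fun h => hci h.1), if_neg (fun h => hnone h.1)]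
    · rw [if_neg (fun h => hk h.2), if_neg (fun h => hk h.2), if_neg (fun h => hk h.2)]

-- ---- B-side: invariant of the onset/run-end scan ----
def pvInv (L : List Int) (PH PHe m : Int) (st : List (Int × Int) × Option Int) : Prop :=
  (∀ p ∈ st.1, 0 ≤ p.1 ∧ p.2 ≤ (L.length : Int)) ∧
  (∀ k : Int, (st.1.any (fun p => decide (p.1 ≤ k) && decide (k < p.2)) = true) ↔
      (∃ i, 1 ≤ i ∧ i < m ∧ pvOnset L i = true ∧ pvStop L i < m ∧ pvLo i PH ≤ k ∧ k < pvHi L i PHe)) ∧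
  (∀ t, st.2 = some t → 1 ≤ t ∧ t < m ∧ pvOnset L t = true ∧ m ≤ pvStop L t) ∧
  (∀ i, 1 ≤ i → i < m → pvOnset L i = true → st.2 ≠ some i → pvStop L i < m)

lemma pvStep_inv (L : List Int) (PH PHe m : Int) (st : List (Int × Int) × Option Int)
    (h1 : 1 ≤ m) (h2 : m < (L.length : Int)) (hinv : pvInv L PH PHe m st) :
    pvInv L PH PHe (m + 1) (pvStepB L PH PHe st m) := by
  unfold pvInv at hinv ⊢
  obtain ⟨hbd, hc, hp, ho⟩ := hinv
  have hspec : ∀ i : Int, 0 ≤ i → i ≤ (L.length : Int) →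
      i ≤ pvStop L i ∧ pvStop L i ≤ (L.length : Int) ∧
      (pvStop L i < (L.length : Int) → pvGetI L (pvStop L i) = 0) ∧
      (∀ j, i ≤ j → j < pvStop L i → pvGetI L j ≠ 0) :=
    fun i h0 h1 => pvStop_spec L ((L.length : Int) - i).toNat i h0 h1 (le_refl _)
  unfold pvStepB
  by_cases hon : (pvGetI L m == 1 && pvGetI L (m - 1) == 0) = true
  · have honm : pvOnset L m = true := hon
    have hm10 : pvGetI L m = 1 ∧ pvGetI L (m - 1) = 0 := by
      simpa [pvOnset, Bool.and_eq_true, beq_iff_eq] using honm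
    have hsm := hspec m (by omega) (by omega)
    have hstopm : m + 1 ≤ pvStop L m := by
      by_contra h
      have he : pvStop L m = m := by omega
      have := hsm.2.2.1 (by omega)
      rw [he] at this
      omega
    have hnostop : ∀ i : Int, 1 ≤ i → i < m → pvStop L i ≠ m := by
      intro i h1i h2i heq
      have hsi := hspec i (by omega) (by omega)
      have := hsi.2.2.1 (by omega)
      rw [heq] at this
      omega
    have hnone : st.2 = none := by
      cases hst : st.2 with
      | none => rfl
      | some t =>
        obtain ⟨ht1, ht2, ht3, ht4⟩ := hp t hst
        have hst' := hspec t (by omega) (by omega)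
        exact absurd hm10.2 (hst'.2.2.2 (m - 1) (by omega) (by omega))
    rw [if_pos hon]
    dsimp only
    refine ⟨hbd, ?_, ?_, ?_⟩
    · intro k
      rw [hc k]
      constructor
      · rintro ⟨i, a, b, c, d, e, f⟩
        exact ⟨i, a, by omega, c, by omega, e, f⟩
      · rintro ⟨i, a, b, c, d, e, f⟩
        have him : i ≠ m := fun he => by subst he; omega
        have hb : i < m := by omega
        have := hnostop i a hb
        exact ⟨i, a, hb, c, by omega, e, f⟩
    · intro t ht
      have htm : t = m := (Option.some.inj ht).symm
      subst htm
      exact ⟨by omega, by omega, honm, hstopm⟩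
    · intro i h1 h2 h3 hne
      have him : i ≠ m := fun he => hne (by rw [he])
      have := ho i h1 (by omega) h3 (by rw [hnone]; simp)
      omega
  · rw [if_neg hon]
    have honm : pvOnset L m ≠ true := fun h => hon h
    cases hst : st.2 with
    | some s =>
      obtain ⟨hs1, hs2, hs3, hs4⟩ := hp s hst
      have hss := hspec s (by omega) (by omega)
      dsimp only
      by_cases hz : (pvGetI L m == 0) = true
      · have hzm : pvGetI L m = 0 := by simpa using hz
        have hstops : pvStop L s = m := by
          by_contra h
          have : m < pvStop L s := by omega
          exact (hss.2.2.2 m (by omega) this) hzm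
        rw [if_pos hz]
        dsimp only
        refine ⟨?_, ?_, ?_, ?_⟩
        · intro p hp'
          rcases List.mem_append.mp hp' with h | h
          · exact hbd p h
          · simp only [List.mem_singleton] at h
            subst h
            constructor
            · simp
            · simp only []
              omega
        · intro k
          rw [List.any_append, Bool.or_eq_true, hc k]
          simp only [List.any_cons, List.any_nil, Bool.or_false, Bool.and_eq_true, decide_eq_true_eq]
          constructor
          · rintro (⟨i, a, b, c, d, e, f⟩ | ⟨g1, g2⟩)
            · exact ⟨i, a, by omega, c, by omega, e, f⟩
            · refine ⟨s, hs1, by omega, hs3, by omega, ?_, ?_⟩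
              · unfold pvLo; exact g1
              · unfold pvHi; rw [hstops]; exact g2
          · rintro ⟨i, a, b, c, d, e, f⟩
            by_cases his : i = s
            · subst his
              right
              refine ⟨?_, ?_⟩
              · unfold pvLo at e; exact e
              · unfold pvHi at f; rw [hstops] at f; exact f
            · left
              have him : i ≠ m := fun hh => by subst hh; exact honm c
              have hb : i < m := by omega
              have hd : pvStop L i < m :=
                ho i a hb c (by rw [hst]; exact fun hcc => his (Option.some.inj hcc).symm)
              exact ⟨i, a, hb, c, hd, e, f⟩
        · intro t ht
          exact absurd ht (by simp)
        · intro i h1 h2 h3 _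
          by_cases his : i = s
          · subst his; omega
          · by_cases him : i = m
            · subst him; exact absurd h3 honm
            · have := ho i h1 (by omega) h3
                (by rw [hst]; exact fun hcc => his (Option.some.inj hcc).symm)
              omega
      · rw [if_neg hz]
        have hzm : pvGetI L m ≠ 0 := by simpa using hz
        have hstopm1 : m + 1 ≤ pvStop L s := by
          by_contra h
          have he : pvStop L s = m := by omega
          have := hss.2.2.1 (by omega)
          rw [he] at this
          exact hzm this
        have hnostop : ∀ i : Int, 1 ≤ i → i < m → pvStop L i ≠ m := by
          intro i hi1 hi2 he
          have hsi := hspec i (by omega) (by omega)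
          have := hsi.2.2.1 (by omega)
          rw [he] at this
          exact hzm this
        refine ⟨hbd, ?_, ?_, ?_⟩
        · intro k
          rw [hc k]
          constructor
          · rintro ⟨i, a, b, c, d, e, f⟩
            exact ⟨i, a, by omega, c, by omega, e, f⟩
          · rintro ⟨i, a, b, c, d, e, f⟩
            have him : i ≠ m := fun hh => by subst hh; exact honm c
            have hb : i < m := by omega
            have := hnostop i a hb
            exact ⟨i, a, hb, c, by omega, e, f⟩
        · intro t ht
          rw [hst] at ht
          have hts : t = s := (Option.some.inj ht).symm
          subst hts
          exact ⟨hs1, by omega, hs3, hstopm1⟩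
        · intro i h1 h2 h3 hne
          by_cases him : i = m
          · subst him; exact absurd h3 honm
          · have := ho i h1 (by omega) h3 hne
            omega
    | none =>
      dsimp only
      have hall : ∀ i, 1 ≤ i → i < m → pvOnset L i = true → pvStop L i < m :=
        fun i a b c => ho i a b c (by rw [hst]; simp)
      refine ⟨hbd, ?_, ?_, ?_⟩
      · intro k
        rw [hc k]
        constructor
        · rintro ⟨i, a, b, c, d, e, f⟩
          exact ⟨i, a, by omega, c, by omega, e, f⟩
        · rintro ⟨i, a, b, c, d, e, f⟩
          have him : i ≠ m := fun hh => by subst hh; exact honm c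
          have hb : i < m := by omega
          exact ⟨i, a, hb, c, hall i a hb c, e, f⟩
      · intro t ht
        rw [hst] at ht
        exact absurd ht (by simp)
      · intro i h1 h2 h3 _
        by_cases him : i = m
        · subst him; exact absurd h3 honm
        · have := hall i h1 (by omega) h3
          omega

lemma pvBfold (L : List Int) (PH PHe : Int) : ∀ t : Nat, 1 + (t : Int) ≤ (L.length : Int) →
    pvInv L PH PHe (1 + t)
      ((PySem.List.pyRange 1 (1 + (t : Int)) 1).foldl (pvStepB L PH PHe) ([], none)) := by
  intro t
  induction t with
  | zero =>
    intro _
    rw [PySem.List.pyRange_one_eq_nil (by norm_num)]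
    simp only [List.foldl_nil]
    unfold pvInv
    refine ⟨by simp, ?_, by simp, ?_⟩
    · intro k
      simp only [List.any_nil, Bool.false_eq_true, false_iff]
      rintro ⟨i, a, b, -⟩
      push_cast at b
      omega
    · intro i a b _ _
      push_cast at b ⊢
      omega
  | succ f ih =>
    intro h
    have hcast : (1 + ((f + 1 : Nat) : Int)) = (1 + (f : Int)) + 1 := by push_cast; ring
    rw [hcast, PySem.List.pyRange_one_succ_right (by omega), List.foldl_append]
    simp only [List.foldl_cons, List.foldl_nil]
    push_cast at h
    exact pvStep_inv L PH PHe (1 + (f : Int)) _ (by omega) (by omega) (ih (by push_cast; omega))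

-- final interval list of B's scan
def pvIvsOf (L : List Int) (PH PHe : Int) : List (Int × Int) :=
  match ((PySem.List.pyRange 1 (L.length : Int) 1).foldl (pvStepB L PH PHe) ([], none)).2 with
  | some s => ((PySem.List.pyRange 1 (L.length : Int) 1).foldl (pvStepB L PH PHe) ([], none)).1
      ++ [(max 0 (s - PH), min (L.length : Int) (s + PHe))]
  | none => ((PySem.List.pyRange 1 (L.length : Int) 1).foldl (pvStepB L PH PHe) ([], none)).1

lemma pvIvs_spec (L : List Int) (PH PHe : Int) :
    (∀ p ∈ pvIvsOf L PH PHe, 0 ≤ p.1 ∧ p.2 ≤ (L.length : Int)) ∧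
    (∀ k : Int,
      ((pvIvsOf L PH PHe).any (fun p => decide (p.1 ≤ k) && decide (k < p.2)) = true) ↔
      (∃ i, 1 ≤ i ∧ i < (L.length : Int) ∧ pvOnset L i = true ∧
        pvLo i PH ≤ k ∧ k < pvHi L i PHe)) := by
  have hspec : ∀ i : Int, 0 ≤ i → i ≤ (L.length : Int) →
      i ≤ pvStop L i ∧ pvStop L i ≤ (L.length : Int) ∧
      (pvStop L i < (L.length : Int) → pvGetI L (pvStop L i) = 0) ∧
      (∀ j, i ≤ j → j < pvStop L i → pvGetI L j ≠ 0) :=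
    fun i h0 h1 => pvStop_spec L ((L.length : Int) - i).toNat i h0 h1 (le_refl _)
  rcases Nat.eq_zero_or_pos L.length with hn | hn
  · unfold pvIvsOf
    rw [hn]
    rw [PySem.List.pyRange_one_eq_nil (by norm_num)]
    simp only [List.foldl_nil]
    refine ⟨by simp, ?_⟩
    intro k
    simp only [List.any_nil, Bool.false_eq_true, false_iff]
    rintro ⟨i, a, b, -⟩
    push_cast at b
    omega
  · have hcast : (1 + ((L.length - 1 : Nat) : Int)) = (L.length : Int) := by
      push_cast
      omega
    have hInv := pvBfold L PH PHe (L.length - 1) (by push_cast; omega)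
    rw [hcast] at hInv
    unfold pvInv at hInv
    obtain ⟨hbd, hc, hp, ho⟩ := hInv
    unfold pvIvsOf
    cases hst : ((PySem.List.pyRange 1 (L.length : Int) 1).foldl (pvStepB L PH PHe) ([], none)).2 with
    | none =>
      dsimp only
      refine ⟨hbd, ?_⟩
      intro k
      rw [hc k]
      constructor
      · rintro ⟨i, a, b, c, d, e, f⟩
        exact ⟨i, a, b, c, e, f⟩
      · rintro ⟨i, a, b, c, e, f⟩
        exact ⟨i, a, b, c, ho i a b c (by rw [hst]; simp), e, f⟩
    | some s =>
      dsimp only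
      obtain ⟨hs1, hs2, hs3, hs4⟩ := hp s hst
      have hss := hspec s (by omega) (by omega)
      have hstops : pvStop L s = (L.length : Int) := by omega
      constructor
      · intro p hp'
        rcases List.mem_append.mp hp' with h | h
        · exact hbd p h
        · simp only [List.mem_singleton] at h
          subst h
          exact ⟨by simp, by simp⟩
      · intro k
        rw [List.any_append, Bool.or_eq_true, hc k]
        simp only [List.any_cons, List.any_nil, Bool.or_false, Bool.and_eq_true, decide_eq_true_eq]
        constructor
        · rintro (⟨i, a, b, c, d, e, f⟩ | ⟨g1, g2⟩)
          · exact ⟨i, a, b, c, e, f⟩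
          · refine ⟨s, hs1, by omega, hs3, ?_, ?_⟩
            · unfold pvLo; exact g1
            · unfold pvHi; rw [hstops]; exact g2
        · rintro ⟨i, a, b, c, e, f⟩
          by_cases his : i = s
          · subst his
            right
            exact ⟨by unfold pvLo at e; exact e, by unfold pvHi at f; rw [hstops] at f; exact f⟩
          · left
            have hd : pvStop L i < (L.length : Int) :=
              ho i a b c (by rw [hst]; exact fun hcc => his (Option.some.inj hcc).symm)
            exact ⟨i, a, b, c, hd, e, f⟩

-- ---- difference array + prefix sum = coverage count ----
lemma pvSum_set_getD (xs : List Int) (j : Nat) (c : Int) :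
    (xs.set j (xs.getD j 0 + c)).sum = xs.sum + (if j < xs.length then c else 0) := by
  rcases Nat.lt_or_ge j xs.length with h | h
  · rw [List.sum_set, if_pos h, if_pos h, List.getD_eq_getElem xs 0 h]
    have hsplit : xs.sum = (xs.take j).sum + xs[j] + (xs.drop (j + 1)).sum := by
      conv_lhs => rw [← List.take_append_drop j xs]
      rw [List.sum_append, List.drop_eq_getElem_cons h, List.sum_cons]
      ring
    omega
  · rw [List.set_eq_of_length_le h, if_neg (by omega)]
    omega

lemma pvSum_take_set (d : List Int) (j : Nat) (c : Int) (m : Nat) (hm : m ≤ d.length) :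
    ((d.set j (d.getD j 0 + c)).take m).sum = (d.take m).sum + (if j < m then c else 0) := by
  rw [List.take_set]
  rcases Nat.lt_or_ge j m with h | h
  · have hj : d.getD j 0 = (d.take m).getD j 0 := by
      rw [List.getD_eq_getElem?_getD, List.getD_eq_getElem?_getD, List.getElem?_take_of_lt h]
    rw [hj, pvSum_set_getD, if_pos h, if_pos (by simp only [List.length_take]; omega)]
  · rw [List.set_eq_of_length_le (by simp only [List.length_take]; omega), if_neg (by omega)]
    omega

lemma pvDiff_sum (ivs : List (Int × Int)) : ∀ (d : List Int) (k : Nat),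
    (∀ p ∈ ivs, 0 ≤ p.1 ∧ p.2 ≤ (d.length : Int) - 1) → k < d.length →
    ((ivs.foldl (fun d p =>
        if p.1 < p.2 then
          (d.set p.1.toNat (PySem.List.pyGetD d p.1 0 + 1)).set p.2.toNat
            (PySem.List.pyGetD (d.set p.1.toNat (PySem.List.pyGetD d p.1 0 + 1)) p.2 0 - 1)
        else d) d).take (k + 1)).sum =
      ((d.take (k + 1)).sum + (ivs.countP (fun p => decide (p.1 ≤ (k : Int)) && decide ((k : Int) < p.2)) : Int)) := by
  induction ivs with
  | nil =>
    intro d k _ _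
    simp
  | cons p rest ih =>
    intro d k hbd hk
    obtain ⟨hp1, hp2⟩ := hbd p List.mem_cons_self
    simp only [List.foldl_cons, List.countP_cons]
    by_cases hlt : p.1 < p.2
    · rw [if_pos hlt]
      set d1 := d.set p.1.toNat (PySem.List.pyGetD d p.1 0 + 1) with hd1
      have hd1len : d1.length = d.length := by rw [hd1]; simp
      set d2 := d1.set p.2.toNat (PySem.List.pyGetD d1 p.2 0 - 1) with hd2
      have hd2len : d2.length = d.length := by rw [hd2, hd1]; simp
      rw [ih d2 k (by rw [hd2len]; exact fun q hq => hbd q (List.mem_cons_of_mem _ hq)) (by omega)]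
      have hsum1 : (d1.take (k + 1)).sum = (d.take (k + 1)).sum + (if p.1.toNat < k + 1 then 1 else 0) := by
        have hg : PySem.List.pyGetD d p.1 0 = d.getD p.1.toNat 0 :=
          PySem.List.pyGetD_of_nonneg d 0 (by omega)
        rw [hd1, hg]
        exact pvSum_take_set d p.1.toNat 1 (k + 1) (by omega)
      have hsum2 : (d2.take (k + 1)).sum = (d1.take (k + 1)).sum + (if p.2.toNat < k + 1 then -1 else 0) := by
        have hg : PySem.List.pyGetD d1 p.2 0 = d1.getD p.2.toNat 0 :=
          PySem.List.pyGetD_of_nonneg d1 0 (by omega)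
        rw [hd2, hg, show d1.getD p.2.toNat 0 - 1 = d1.getD p.2.toNat 0 + (-1) by ring]
        exact pvSum_take_set d1 p.2.toNat (-1) (k + 1) (by rw [hd1len]; omega)
      rw [hsum2, hsum1]
      by_cases P1 : p.1 ≤ (k : Int) <;> by_cases P2 : (k : Int) < p.2 <;>
        simp [P1, P2] <;>
        first
          | (split_ifs <;> push_cast <;> omega)
          | (push_cast; omega)
          | omega
    · rw [if_neg hlt]
      rw [ih d k (fun q hq => hbd q (List.mem_cons_of_mem _ hq)) hk]
      have : (decide (p.1 ≤ (k : Int)) && decide ((k : Int) < p.2)) = false := by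
        simp only [Bool.and_eq_false_iff, decide_eq_false_iff_not]
        omega
      rw [this]
      simp

-- prefix-sum loop: state after n steps
lemma pvTake_succ_sum (diff : List Int) (m : Nat) :
    (diff.take (m + 1)).sum = (diff.take m).sum + PySem.List.pyGetD diff (m : Int) 0 := by
  rw [PySem.List.pyGetD_natCast, List.take_add_one, List.sum_append, List.getD_eq_getElem?_getD]
  cases h : diff[m]? <;> simp

lemma pvScan_spec (diff : List Int) : ∀ n : Nat,
    ((List.range n).foldl (fun (s : Int × List Int) (k : Nat) =>
        let acc := s.1 + PySem.List.pyGetD diff (k : Int) 0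
        (acc, s.2 ++ [if acc > 0 then (1 : Int) else 0])) ((0 : Int), [])) =
      ((diff.take n).sum,
        (List.range n).map (fun k => if (diff.take (k + 1)).sum > 0 then (1 : Int) else 0)) := by
  intro n
  induction n with
  | zero => simp
  | succ n ih =>
    rw [List.range_succ, List.foldl_append, ih]
    simp only [List.foldl_cons, List.foldl_nil, List.map_append, List.map_cons, List.map_nil]
    rw [← pvTake_succ_sum]

-- ===== VERDICT (by name: the statement is the Claim_ definition above) =====
theorem generate_early_detection_labels_SETUP_1_constant_spec : Claim_equal_generate_early_detection_labels_SETUP_1_constant := by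
  intro L PH PHe _
  unfold Spec_generate_early_detection_labels_SETUP_1_constant
  obtain ⟨hivbd, hivcov⟩ := pvIvs_spec L PH PHe
  have hAlt : generate_early_detection_labels_SETUP_1_constant_alt L PH PHe =
      (List.range L.length).map (fun k =>
        if (((pvIvsOf L PH PHe).foldl (fun d p =>
              if p.1 < p.2 then
                (d.set p.1.toNat (PySem.List.pyGetD d p.1 0 + 1)).set p.2.toNat
                  (PySem.List.pyGetD (d.set p.1.toNat (PySem.List.pyGetD d p.1 0 + 1)) p.2 0 - 1)
              else d)
            ((List.range (L.length + 1)).map (fun _ => (0 : Int)))).take (k + 1)).sum > 0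
        then (1 : Int) else 0) := by
    unfold generate_early_detection_labels_SETUP_1_constant_alt
    dsimp only
    rw [pvScan_spec]
    rfl
  rw [hAlt]
  unfold generate_early_detection_labels_SETUP_1_constant
  dsimp only
  obtain ⟨hlenA, hgetA⟩ := pvAfold L PH PHe (PySem.List.pyRange 1 (L.length : Int) 1)
    ((List.range L.length).map (fun _ => (0 : Int))) (by simp)
    (fun i hi => by rw [PySem.List.mem_pyRange_one] at hi; omega)
  apply List.ext_getElem?
  intro k
  rw [hgetA k]
  by_cases hk : k < L.length
  · have hzlen : ((List.range (L.length + 1)).map (fun _ => (0 : Int))).length = L.length + 1 := by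
      simp
    have hzsum : ∀ t : Nat,
        ((((List.range (L.length + 1)).map (fun _ => (0 : Int)))).take t).sum = 0 := by
      intro t
      apply List.sum_eq_zero
      intro x hx
      have hx' := List.mem_of_mem_take hx
      simp only [List.mem_map] at hx'
      obtain ⟨a, -, ha⟩ := hx'
      exact ha.symm
    have hsum := pvDiff_sum (pvIvsOf L PH PHe)
      ((List.range (L.length + 1)).map (fun _ => (0 : Int))) k
      (by
        intro p hp
        obtain ⟨h1, h2⟩ := hivbd p hp
        refine ⟨h1, ?_⟩
        rw [hzlen]
        push_cast
        omega)
      (by rw [hzlen]; omega)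
    rw [hzsum (k + 1)] at hsum
    by_cases hC : ∃ i, 1 ≤ i ∧ i < (L.length : Int) ∧ pvOnset L i = true ∧
        pvLo i PH ≤ (k : Int) ∧ (k : Int) < pvHi L i PHe
    · have hE : ∃ i ∈ PySem.List.pyRange 1 (L.length : Int) 1,
          pvOnset L i = true ∧ pvLo i PH ≤ (k : Int) ∧ (k : Int) < pvHi L i PHe := by
        obtain ⟨i, a, b, c, e, f⟩ := hC
        exact ⟨i, by rw [PySem.List.mem_pyRange_one]; exact ⟨a, b⟩, c, e, f⟩
      rw [if_pos ⟨hE, hk⟩]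
      have hcp : 0 < (pvIvsOf L PH PHe).countP
          (fun p => decide (p.1 ≤ (k : Int)) && decide ((k : Int) < p.2)) := by
        rw [List.countP_pos_iff]
        have hany := (hivcov (k : Int)).mpr hC
        rw [List.any_eq_true] at hany
        exact hany
      simp only [List.getElem?_map, List.getElem?_range hk, Option.map_some]
      rw [hsum, if_pos (by omega)]
    · have hE' : ¬ ((∃ i ∈ PySem.List.pyRange 1 (L.length : Int) 1,
          pvOnset L i = true ∧ pvLo i PH ≤ (k : Int) ∧ (k : Int) < pvHi L i PHe) ∧ k < L.length) := by
        rintro ⟨⟨i, hi, c, e, f⟩, -⟩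
        rw [PySem.List.mem_pyRange_one] at hi
        exact hC ⟨i, hi.1, hi.2, c, e, f⟩
      rw [if_neg hE']
      have hcp : (pvIvsOf L PH PHe).countP
          (fun p => decide (p.1 ≤ (k : Int)) && decide ((k : Int) < p.2)) = 0 := by
        rcases Nat.eq_zero_or_pos ((pvIvsOf L PH PHe).countP
          (fun p => decide (p.1 ≤ (k : Int)) && decide ((k : Int) < p.2))) with h | h
        · exact h
        · exact absurd ((hivcov (k : Int)).mp (List.any_eq_true.mpr (List.countP_pos_iff.mp h))) hC
      simp only [List.getElem?_map, List.getElem?_range hk, Option.map_some]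
      rw [hsum, hcp]
      norm_num
  · rw [if_neg (fun h => hk h.2)]
    rw [List.getElem?_eq_none (by simpa using Nat.le_of_not_lt hk),
      List.getElem?_eq_none (by simpa using Nat.le_of_not_lt hk)]
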